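-- pv_equiv track=rewrite | github.com/Farzy/python3-training | codewars/duplicate_encoder.py | duplicate_encode_mine2
-- ===== SOURCE A (Python) =====
-- def duplicate_encode_mine2(word):
--     """Optimize lower() calls"""
--
--     result = {}
--     word = word.lower()
--     for c in word:
--         if c in result:
--             result[c] = ")"
--         else:
--             result[c] = "("
--     return "".join(result[c] for c in word)
-- ===== SOURCE B (Python) =====
-- def duplicate_encode_mine2(word):
--     """Sort-then-scan: peel runs off the sorted word to collect the once-occurring chars."""
--     w = word.lower()
--     singles = _singles(sorted(w))
--     return "".join("(" if c in singles else ")" for c in w)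
--
--
-- def _singles(sw):
--     """sw is sorted; return the set of characters whose run has length 1."""
--     if not sw:
--         return set()
--     c = sw[0]
--     i = 1
--     while i < len(sw) and sw[i] == c:
--         i += 1
--     s = _singles(sw[i:])
--     if i == 1:
--         s.add(c)
--     return s
-- ===== Notes on version B (the rewrite author's own statement) =====
-- stated objective: alternative
-- what changed: Replaces A's first-seen/seen-again dict loop by sorting the lowered word and recursively peeling runs of equal characters off the sorted list to collect the set of once-occurring characters, then mapping set membership over the word.
import Mathlib
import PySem

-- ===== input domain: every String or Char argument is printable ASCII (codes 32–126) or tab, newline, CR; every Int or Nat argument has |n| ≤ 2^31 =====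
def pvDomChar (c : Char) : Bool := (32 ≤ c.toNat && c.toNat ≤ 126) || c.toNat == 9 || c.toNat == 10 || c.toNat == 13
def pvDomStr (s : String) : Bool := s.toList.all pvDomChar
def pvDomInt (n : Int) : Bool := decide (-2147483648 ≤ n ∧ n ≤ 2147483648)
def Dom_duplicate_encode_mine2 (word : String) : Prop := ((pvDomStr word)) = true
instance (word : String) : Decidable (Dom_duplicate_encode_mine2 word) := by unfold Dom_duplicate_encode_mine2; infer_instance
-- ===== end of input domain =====

-- B replaces A's first-seen/seen-again dict with a sort-then-scan: peel runs off the sorted word to collect the once-occurring chars, then map set membership (alternative algorithm; same return value).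

-- ===== PORT A =====
def duplicate_encode_mine2 (word : String) : String :=
  let w := (PySem.Str.lower word).toList
  let result := w.foldl
    (fun d c => if d.contains c then d.insert c ")" else d.insert c "(")
    (PySem.Dict.empty : PySem.Dict Char String)
  PySem.Str.join "" (w.map (fun c => result.getD c ""))

-- ===== PORT B =====
-- port of Source B's _singles: the index while-loop counts the leading run of c in the tail t
-- (i - 1 = (t.takeWhile (· == c)).length, sw[i:] = t.dropWhile (· == c)); exact step for step.
def pvSingles : List Char → PySem.Set Char
  | [] => PySem.Set.empty
  | c :: t =>
    let rest := t.dropWhile (· == c)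
    let s := pvSingles rest
    if (t.takeWhile (· == c)).length = 0 then PySem.Set.add s c else s
termination_by sw => sw.length
decreasing_by
  simpa using Nat.lt_succ_of_le (List.length_dropWhile_le (· == c) t)

def duplicate_encode_mine2_alt (word : String) : String :=
  let w := (PySem.Str.lower word).toList
  let singles := pvSingles (PySem.List.sorted w (fun x => x) false)
  PySem.Str.join "" (w.map (fun c => if PySem.Set.contains singles c then "(" else ")"))

-- ===== PRECONDITION & SPEC =====
def Spec_duplicate_encode_mine2 (word : String) (out : String) : Prop := out = duplicate_encode_mine2_alt word
instance (word : String) (out : String) : Decidable (Spec_duplicate_encode_mine2 word out) := by unfold Spec_duplicate_encode_mine2; infer_instance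

-- ===== CLAIM (what is proved, stated in full; the proofs are below) =====
def Claim_equal_duplicate_encode_mine2 : Prop := ∀ (word : String), Dom_duplicate_encode_mine2 word → Spec_duplicate_encode_mine2 word (duplicate_encode_mine2 word)

-- ===== LEMMAS AND PROOFS =====

-- Characterisation of A's dict loop: after folding over l starting from d,
-- the lookup at c is d's if c ∉ l, ")" if c was already a key or occurs twice in l, "(" otherwise.
lemma dict_loop_get? (l : List Char) (d : PySem.Dict Char String) (c : Char) :
    (l.foldl (fun d c => if d.contains c then d.insert c ")" else d.insert c "(") d).get? c =
      if l.count c = 0 then d.get? c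
      else if d.contains c = true ∨ 2 ≤ l.count c then some ")" else some "(" := by
  induction l generalizing d with
  | nil => simp
  | cons x l ih =>
    simp only [List.foldl_cons, List.count_cons]
    by_cases hx : c = x
    · subst hx
      by_cases hc : d.contains c = true
      · rw [if_pos hc, ih]
        simp [PySem.Dict.contains_insert_self, PySem.Dict.get?_insert_self, hc]
      · rw [if_neg hc, ih]
        simp only [PySem.Dict.contains_insert_self, PySem.Dict.get?_insert_self, hc]
        by_cases h0 : l.count c = 0
        · simp [h0]
        · have h2 : 2 ≤ l.count c + 1 := by omega
          simp [h0, h2]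
    · have hxc : ¬ x = c := fun h => hx h.symm
      have hg : ((if d.contains x then d.insert x ")" else d.insert x "(") : PySem.Dict Char String).get? c =
          d.get? c := by
        split_ifs <;> simp [PySem.Dict.get?_insert, hx]
      have hcn : ((if d.contains x then d.insert x ")" else d.insert x "(") : PySem.Dict Char String).contains c =
          d.contains c := by
        split_ifs <;> simp [PySem.Dict.contains_insert, hx]
      rw [ih, hg, hcn]
      simp [hxc]

lemma dict_loop_getD (l : List Char) (c : Char) (h : c ∈ l) :
    (l.foldl (fun d c => if d.contains c then d.insert c ")" else d.insert c "(")
        (PySem.Dict.empty : PySem.Dict Char String)).getD c "" =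
      if l.count c = 1 then "(" else ")" := by
  have hcnt : 1 ≤ l.count c := List.one_le_count_iff.mpr h
  rw [PySem.Dict.getD_eq_get?_getD, dict_loop_get?]
  simp only [PySem.Dict.get?_empty, PySem.Dict.contains_empty]
  split_ifs with h1 h2 h3 h4 <;> first | (simp_all; omega) | simp_all | omega

-- Unfolding equation for pvSingles on a cons (let-free form).
lemma pvSingles_cons (x : Char) (t : List Char) :
    pvSingles (x :: t) =
      if (t.takeWhile (· == x)).length = 0
      then PySem.Set.add (pvSingles (t.dropWhile (· == x))) x
      else pvSingles (t.dropWhile (· == x)) := by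
  rw [pvSingles]

-- Every member of pvSingles sw is a member of sw.
lemma pvSingles_subset (sw : List Char) (c : Char) (h : c ∈ pvSingles sw) : c ∈ sw := by
  induction sw using pvSingles.induct with
  | case1 => simp [pvSingles] at h
  | case2 x t _rest hr ih =>
    rw [pvSingles_cons, if_pos hr, PySem.Set.mem_add] at h
    rcases h with h | h
    · exact List.mem_cons_of_mem x ((List.dropWhile_sublist _).subset (ih h))
    · simp [h]
  | case3 x t _rest hr ih =>
    rw [pvSingles_cons, if_neg hr] at h
    exact List.mem_cons_of_mem x ((List.dropWhile_sublist _).subset (ih h))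

-- After the leading run of x is dropped from a sorted list whose elements all dominate x,
-- x never occurs again.
lemma count_dropWhile_zero (t : List Char) (x : Char)
    (hs : t.Pairwise (· ≤ ·)) (hx : ∀ y ∈ t, x ≤ y) :
    (t.dropWhile (· == x)).count x = 0 := by
  induction t with
  | nil => simp
  | cons a t ih =>
    by_cases ha : a = x
    · subst ha
      rw [List.dropWhile_cons_of_pos (by simp)]
      exact ih (List.Pairwise.of_cons hs) (fun y hy => hx y (List.mem_cons_of_mem a hy))
    · rw [List.dropWhile_cons_of_neg (by simp [ha])]
      have hxa : x < a := lt_of_le_of_ne (hx a (List.mem_cons_self)) (fun h => ha h.symm)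
      rw [List.count_cons]
      have h0 : t.count x = 0 := by
        rw [List.count_eq_zero]
        intro hmem
        exact absurd (List.rel_of_pairwise_cons hs hmem) (not_le.mpr hxa)
      simp [h0, ha]

lemma pvSingles_rest_sorted (x : Char) (t : List Char)
    (hs : (x :: t).Pairwise (· ≤ ·)) : (t.dropWhile (· == x)).Pairwise (· ≤ ·) :=
  List.Pairwise.sublist (List.dropWhile_sublist _) (List.Pairwise.of_cons hs)

-- One peeling step: the head x never reappears in the rest (so it is not in the
-- recursive set), and the count of any c in x :: t splits along the run.
lemma pvSingles_step (x : Char) (t : List Char)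
    (hs : (x :: t).Pairwise (· ≤ ·)) (c : Char) :
    (c = x → c ∉ pvSingles (t.dropWhile (· == x))) ∧
      (x :: t).count c =
        (if c = x then 1 + (t.takeWhile (· == x)).length else (t.dropWhile (· == x)).count c) := by
  have hx : ∀ y ∈ t, x ≤ y := fun y hy => List.rel_of_pairwise_cons hs hy
  have ht : t.Pairwise (· ≤ ·) := List.Pairwise.of_cons hs
  have hsplit : t = t.takeWhile (· == x) ++ t.dropWhile (· == x) :=
    (List.takeWhile_append_dropWhile).symm
  have hrun : ∀ y ∈ t.takeWhile (· == x), y = x := by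
    intro y hy
    simpa using List.mem_takeWhile_imp hy
  have hdropx : (t.dropWhile (· == x)).count x = 0 := count_dropWhile_zero t x ht hx
  constructor
  · intro hcx hmem
    subst hcx
    have := pvSingles_subset _ _ hmem
    rw [← List.count_pos_iff] at this
    omega
  · by_cases hcx : c = x
    · subst hcx
      rw [if_pos rfl, List.count_cons, hsplit, List.count_append]
      have : (t.takeWhile (· == c)).count c = (t.takeWhile (· == c)).length :=
        List.count_eq_length.mpr (fun b hb => (hrun b hb).symm)
      simp [this, hdropx]
      omega
    · have hxc : ¬ x = c := fun h => hcx h.symm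
      rw [if_neg hcx, List.count_cons, hsplit, List.count_append]
      have : (t.takeWhile (· == x)).count c = 0 := by
        rw [List.count_eq_zero]
        intro hmem
        exact hcx (hrun c hmem)
      simp [this, hxc]

-- Main characterisation: on a sorted list, pvSingles collects exactly the chars of count 1.
lemma mem_pvSingles (sw : List Char) (hs : sw.Pairwise (· ≤ ·)) (c : Char) :
    c ∈ pvSingles sw ↔ sw.count c = 1 := by
  induction sw using pvSingles.induct with
  | case1 => simp [pvSingles]
  | case2 x t _rest hr ih =>
    obtain ⟨hnot, hcount⟩ := pvSingles_step x t hs c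
    rw [pvSingles_cons, if_pos hr, PySem.Set.mem_add, hcount]
    by_cases hcx : c = x
    · subst hcx
      simp [hnot rfl, hr]
    · simpa [hcx] using ih (pvSingles_rest_sorted x t hs)
  | case3 x t _rest hr ih =>
    obtain ⟨hnot, hcount⟩ := pvSingles_step x t hs c
    rw [pvSingles_cons, if_neg hr, hcount]
    by_cases hcx : c = x
    · subst hcx
      rw [if_pos rfl]
      constructor
      · intro h; exact absurd h (hnot rfl)
      · intro h; omega
    · rw [if_neg hcx]
      simpa using ih (pvSingles_rest_sorted x t hs)

-- ===== VERDICT (by name: the statement is the Claim_ definition above) =====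
theorem duplicate_encode_mine2_spec : Claim_equal_duplicate_encode_mine2 := by
  intro word _
  unfold Spec_duplicate_encode_mine2 duplicate_encode_mine2 duplicate_encode_mine2_alt
  simp only []
  congr 1
  apply List.map_congr_left
  intro c hc
  set w := (PySem.Str.lower word).toList with hw
  have hsorted : (PySem.List.sorted w (fun x => x) false).Pairwise (· ≤ ·) := by
    simpa using PySem.List.sorted_pairwise w (fun x => x)
  have hperm : (PySem.List.sorted w (fun x => x) false).Perm w :=
    PySem.List.sorted_perm w (fun x => x) false
  have hmem : c ∈ pvSingles (PySem.List.sorted w (fun x => x) false) ↔ w.count c = 1 := by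
    rw [mem_pvSingles _ hsorted, hperm.count_eq]
  rw [dict_loop_getD w c hc]
  by_cases h1 : w.count c = 1
  · rw [if_pos h1]
    have h2 : PySem.Set.contains (pvSingles (PySem.List.sorted w (fun x => x) false)) c = true :=
      (PySem.Set.contains_iff _ _).mpr (hmem.mpr h1)
    rw [h2]
    simp
  · rw [if_neg h1]
    have h2 : PySem.Set.contains (pvSingles (PySem.List.sorted w (fun x => x) false)) c = false := by
      rw [Bool.eq_false_iff, Ne, PySem.Set.contains_iff, hmem]; exact h1
    rw [h2]
    simp
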